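-- pv_equiv track=rewrite | github.com/woozyrabbit123/acha-code-health-agent | src/ace/fileio.py | detect_newline_style
-- ===== SOURCE A (Python) =====
-- from typing import Literal
--
-- def detect_newline_style(content: str) -> Literal["LF", "CRLF", "CR", "MIXED"]:
--     """
--     Detect the newline style used in text content.
--
--     Args:
--         content: Text content to analyze
--
--     Returns:
--         Newline style: "LF" (Unix), "CRLF" (Windows), "CR" (old Mac), or "MIXED"
--
--     Examples:
--         >>> detect_newline_style("line1\\nline2\\n")
--         'LF'
--         >>> detect_newline_style("line1\\r\\nline2\\r\\n")
--         'CRLF'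
--     """
--     # Count different newline types
--     # For mixed detection, need to check for standalone LF, CR, and CRLF
--     has_crlf = "\r\n" in content
--
--     # Check for standalone LF (not part of CRLF)
--     has_standalone_lf = False
--     for i, char in enumerate(content):
--         if char == "\n" and (i == 0 or content[i - 1] != "\r"):
--             has_standalone_lf = True
--             break
--
--     # Check for standalone CR (not part of CRLF)
--     has_standalone_cr = False
--     for i, char in enumerate(content):
--         if char == "\r" and (i == len(content) - 1 or content[i + 1] != "\n"):
--             has_standalone_cr = True
--             break
--
--     # Count distinct styles
--     styles = sum([has_crlf, has_standalone_lf, has_standalone_cr])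
--
--     if styles == 0:
--         return "LF"  # Default for files with no newlines
--     if styles > 1:
--         return "MIXED"
--     if has_crlf:
--         return "CRLF"
--     if has_standalone_lf:
--         return "LF"
--     return "CR"
-- ===== SOURCE B (Python) =====
-- def detect_newline_style(content: str) -> str:
--     # One pass over the text with the previous character as state,
--     # instead of substring search plus two index-scanning loops.
--     has_crlf = False
--     has_lf = False
--     has_cr = False
--     prev = None
--     for ch in content:
--         if ch == "\n":
--             if prev == "\r":
--                 has_crlf = True
--             else:
--                 has_lf = True
--         elif prev == "\r":
--             has_cr = True
--         prev = ch
--     if prev == "\r":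
--         has_cr = True
--     styles = has_crlf + has_lf + has_cr
--     if styles == 0:
--         return "LF"
--     if styles > 1:
--         return "MIXED"
--     if has_crlf:
--         return "CRLF"
--     if has_lf:
--         return "LF"
--     return "CR"
-- ===== Notes on version B (the rewrite author's own statement) =====
-- stated objective: alternative
-- what changed: Replaces A's substring search plus two separate index-scanning loops (with i-1/i+1 lookbehind/lookahead) by a single left-to-right pass that carries the previous character as state and sets all three newline flags in one traversal.
import Mathlib
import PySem

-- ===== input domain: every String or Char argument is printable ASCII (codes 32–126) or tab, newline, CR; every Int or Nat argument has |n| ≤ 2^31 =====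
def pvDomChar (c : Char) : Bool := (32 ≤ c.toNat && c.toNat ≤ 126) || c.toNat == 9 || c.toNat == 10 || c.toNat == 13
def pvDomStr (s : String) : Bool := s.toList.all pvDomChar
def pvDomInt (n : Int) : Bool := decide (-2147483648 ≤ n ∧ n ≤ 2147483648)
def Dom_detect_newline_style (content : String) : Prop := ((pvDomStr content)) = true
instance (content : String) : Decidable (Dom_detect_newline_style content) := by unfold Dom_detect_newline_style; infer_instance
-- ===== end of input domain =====

-- B replaces A's substring search plus two index-scanning loops by one left-to-right
-- pass carrying the previous character as state (one traversal instead of up to three).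

-- ===== PORT A =====
def detect_newline_style (content : String) : String :=
  let cs := content.toList
  let has_crlf := PySem.Str.isIn "\r\n" content
  let has_standalone_lf := (PySem.List.enumerate cs).any (fun p =>
      p.2 == '\n' && (p.1 == 0 || !(PySem.List.pyGet? cs (p.1 - 1) == some '\r')))
  let has_standalone_cr := (PySem.List.enumerate cs).any (fun p =>
      p.2 == '\r' && (p.1 == (cs.length : Int) - 1 || !(PySem.List.pyGet? cs (p.1 + 1) == some '\n')))
  let styles := (cond has_crlf 1 0) + (cond has_standalone_lf 1 0) + (cond has_standalone_cr 1 0)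
  if styles == 0 then "LF"
  else if styles > 1 then "MIXED"
  else if has_crlf then "CRLF"
  else if has_standalone_lf then "LF"
  else "CR"

-- ===== PORT B =====
-- the for-loop of Source B: state (has_crlf, has_lf, has_cr, prev)
def bLoop : Bool → Bool → Bool → Option Char → List Char → Bool × Bool × Bool × Option Char
  | crlf, lf, cr, prev, [] => (crlf, lf, cr, prev)
  | crlf, lf, cr, prev, ch :: rest =>
      if ch = '\n' then
        if prev = some '\r' then bLoop true lf cr (some ch) rest
        else bLoop crlf true cr (some ch) rest
      else if prev = some '\r' then bLoop crlf lf true (some ch) rest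
      else bLoop crlf lf cr (some ch) rest

def detect_newline_style_alt (content : String) : String :=
  let r := bLoop false false false none content.toList
  let has_crlf := r.1
  let has_lf := r.2.1
  let has_cr := r.2.2.1 || (r.2.2.2 == some '\r')
  let styles := (cond has_crlf 1 0) + (cond has_lf 1 0) + (cond has_cr 1 0)
  if styles == 0 then "LF"
  else if styles > 1 then "MIXED"
  else if has_crlf then "CRLF"
  else if has_lf then "LF"
  else "CR"

-- ===== PRECONDITION & SPEC =====
def Spec_detect_newline_style (content : String) (out : String) : Prop := out = detect_newline_style_alt content
instance (content : String) (out : String) : Decidable (Spec_detect_newline_style content out) := by unfold Spec_detect_newline_style; infer_instance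

-- ===== CLAIM (what is proved, stated in full; the proofs are below) =====
def Claim_equal_detect_newline_style : Prop := ∀ (content : String), Dom_detect_newline_style content → Spec_detect_newline_style content (detect_newline_style content)

-- ===== LEMMAS AND PROOFS =====

-- reference scans; the Bool argument: was the previous character a '\r'?
def scanCRLF (b : Bool) : List Char → Bool
  | [] => false
  | ch :: rest => (b && ch == '\n') || scanCRLF (ch == '\r') rest

def scanLF (b : Bool) : List Char → Bool
  | [] => false
  | ch :: rest => ((ch == '\n') && !b) || scanLF (ch == '\r') rest

def scanCR (b : Bool) : List Char → Bool
  | [] => b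
  | ch :: rest => (b && !(ch == '\n')) || scanCR (ch == '\r') rest

theorem scanCRLF_iff (b : Bool) (cs : List Char) :
    scanCRLF b cs = true ↔ (b = true ∧ cs.head? = some '\n') ∨ ['\r', '\n'] <:+: cs := by
  induction cs generalizing b with
  | nil => simp [scanCRLF]
  | cons c t ih =>
    simp only [scanCRLF, Bool.or_eq_true, Bool.and_eq_true, beq_iff_eq, ih,
      List.head?_cons, Option.some.injEq, List.infix_cons_iff]
    constructor
    · rintro (⟨hb, hc⟩ | ⟨hd, hh⟩ | hi)
      · exact Or.inl ⟨hb, hc⟩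
      · rcases t with _ | ⟨c2, t2⟩
        · simp at hh
        · simp at hh
          right; left
          simp [List.cons_prefix_cons, hd, hh]
      · exact Or.inr (Or.inr hi)
    · rintro (⟨hb, hc⟩ | hp | hi)
      · exact Or.inl ⟨hb, hc⟩
      · rcases t with _ | ⟨c2, t2⟩
        · rcases hp with ⟨l, hl⟩; simp at hl
        · rw [List.cons_prefix_cons] at hp
          obtain ⟨rfl, hp2⟩ := hp
          rw [List.cons_prefix_cons] at hp2
          right; left
          simp [hp2.1.symm]
      · exact Or.inr (Or.inr hi)

theorem scanLF_iff (b : Bool) (cs : List Char) :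
    scanLF b cs = true ↔ ∃ k, ∃ _ : k < cs.length,
      cs[k] = '\n' ∧ (if k = 0 then b = false else cs[k-1]? ≠ some '\r') := by
  induction cs generalizing b with
  | nil => simp [scanLF]
  | cons c t ih =>
    simp only [scanLF, Bool.or_eq_true, Bool.and_eq_true, beq_iff_eq, Bool.not_eq_true', ih]
    constructor
    · rintro (⟨hc, hb⟩ | ⟨k, hk, hnl, hcond⟩)
      · exact ⟨0, by simp, by simpa using ⟨hc, hb⟩⟩
      · refine ⟨k + 1, by simpa using hk, by simpa using hnl, ?_⟩
        simp only [Nat.add_sub_cancel, if_neg (Nat.succ_ne_zero k)]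
        rcases Nat.eq_zero_or_pos k with rfl | hkpos
        · simpa using hcond
        · rw [if_neg (Nat.pos_iff_ne_zero.mp hkpos)] at hcond
          rw [List.getElem?_cons]
          simp only [if_neg (Nat.pos_iff_ne_zero.mp hkpos)]
          simpa using hcond
    · rintro ⟨k, hk, hnl, hcond⟩
      rcases k with _ | k
      · left; simp at hnl hcond; exact ⟨hnl, hcond⟩
      · right
        refine ⟨k, by simpa using hk, by simpa using hnl, ?_⟩
        simp only [Nat.add_sub_cancel, if_neg (Nat.succ_ne_zero k)] at hcond
        rcases Nat.eq_zero_or_pos k with rfl | hkpos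
        · simpa using hcond
        · rw [if_neg (Nat.pos_iff_ne_zero.mp hkpos)]
          rw [List.getElem?_cons, if_neg (Nat.pos_iff_ne_zero.mp hkpos)] at hcond
          simpa using hcond

theorem scanCR_iff (b : Bool) (cs : List Char) :
    scanCR b cs = true ↔ (b = true ∧ cs.head? ≠ some '\n') ∨
      ∃ k, ∃ _ : k < cs.length, cs[k] = '\r' ∧ cs[k+1]? ≠ some '\n' := by
  induction cs generalizing b with
  | nil => simp [scanCR]
  | cons c t ih =>
    simp only [scanCR, Bool.or_eq_true, Bool.and_eq_true, ih]
    constructor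
    · rintro (⟨hb, hc⟩ | ⟨hcr, hh⟩ | ⟨k, hk, hr, hn⟩)
      · left
        simp only [Bool.not_eq_eq_eq_not, Bool.not_true, beq_eq_false_iff_ne] at hc
        simp [hb, hc]
      · right
        simp only [beq_iff_eq] at hcr
        refine ⟨0, by simp, by simpa using hcr, ?_⟩
        simpa [List.head?_eq_getElem?] using hh
      · exact Or.inr ⟨k + 1, by simpa using hk, by simpa using hr, by simpa using hn⟩
    · rintro (⟨hb, hh⟩ | ⟨k, hk, hr, hn⟩)
      · left
        simp only [List.head?_cons] at hh
        refine ⟨hb, ?_⟩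
        simp only [Bool.not_eq_eq_eq_not, Bool.not_true, beq_eq_false_iff_ne]
        simpa using hh
      · rcases k with _ | k
        · right; left
          simp only [List.getElem_cons_zero] at hr
          refine ⟨by simp [hr], ?_⟩
          simpa [List.head?_eq_getElem?] using hn
        · right; right
          exact ⟨k, by simpa using hk, by simpa using hr, by simpa using hn⟩

theorem bLoop_spec (crlf lf cr : Bool) (prev : Option Char) (cs : List Char) :
    (bLoop crlf lf cr prev cs).1 = (crlf || scanCRLF (prev == some '\r') cs) ∧
    (bLoop crlf lf cr prev cs).2.1 = (lf || scanLF (prev == some '\r') cs) ∧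
    ((bLoop crlf lf cr prev cs).2.2.1 || ((bLoop crlf lf cr prev cs).2.2.2 == some '\r'))
      = (cr || scanCR (prev == some '\r') cs) := by
  induction cs generalizing crlf lf cr prev with
  | nil => simp [bLoop, scanCRLF, scanLF, scanCR]
  | cons c t ih =>
    have e1 : ∀ (x y : Char), (x == y) = decide (x = y) := fun x y => by
      by_cases h : x = y <;> simp [h]
    have e2 : ∀ (x : Option Char) (y : Char), (x == some y) = decide (x = some y) :=
      fun x y => by by_cases h : x = some y <;> simp [h]
    by_cases hn : c = '\n' <;> by_cases hp : prev = some '\r' <;>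
      simp [bLoop, scanCRLF, scanLF, scanCR, e1, e2, hn, hp, ih] <;>
      first
        | simpa [e1, e2] using (ih crlf lf true (some c)).2.2
        | simpa [e1, e2] using (ih crlf lf cr (some c)).2.2
        | simpa [e1, e2] using (ih true lf cr (some '\n')).2.2
        | simpa [e1, e2] using (ih crlf true cr (some '\n')).2.2

theorem a_crlf_eq (content : String) :
    PySem.Str.isIn "\r\n" content = scanCRLF false content.toList := by
  rw [Bool.eq_iff_iff, PySem.Str.isIn_iff_infix, scanCRLF_iff]
  simp

theorem a_lf_eq (cs : List Char) :
    ((PySem.List.enumerate cs).any (fun p =>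
      p.2 == '\n' && (p.1 == 0 || !(PySem.List.pyGet? cs (p.1 - 1) == some '\r'))))
    = scanLF false cs := by
  rw [Bool.eq_iff_iff, List.any_eq_true, scanLF_iff]
  constructor
  · rintro ⟨p, hp, hf⟩
    rw [PySem.List.mem_enumerate_iff] at hp
    obtain ⟨k, hk, rfl⟩ := hp
    simp only [zero_add, Bool.and_eq_true, beq_iff_eq, Bool.or_eq_true] at hf
    refine ⟨k, hk, hf.1, ?_⟩
    rcases Nat.eq_zero_or_pos k with rfl | hkpos
    · simp
    · have hkne : k ≠ 0 := Nat.pos_iff_ne_zero.mp hkpos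
      rw [if_neg hkne]
      rcases hf.2 with h0 | hget
      · exfalso
        have : (k : Int) = 0 := by simpa using h0
        omega
      · have hcast : (k : Int) - 1 = ((k - 1 : Nat) : Int) := by omega
        rw [hcast, PySem.List.pyGet?_natCast] at hget
        simpa using hget
  · rintro ⟨k, hk, hnl, hcond⟩
    refine ⟨((k : Int), cs[k]), ?_, ?_⟩
    · rw [PySem.List.mem_enumerate_iff]
      exact ⟨k, hk, by simp⟩
    · simp only [Bool.and_eq_true, beq_iff_eq, Bool.or_eq_true]
      refine ⟨hnl, ?_⟩
      rcases Nat.eq_zero_or_pos k with rfl | hkpos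
      · left; simp
      · have hkne : k ≠ 0 := Nat.pos_iff_ne_zero.mp hkpos
        rw [if_neg hkne] at hcond
        right
        have hcast : (k : Int) - 1 = ((k - 1 : Nat) : Int) := by omega
        rw [hcast, PySem.List.pyGet?_natCast]
        simpa using hcond

theorem a_cr_eq (cs : List Char) :
    ((PySem.List.enumerate cs).any (fun p =>
      p.2 == '\r' && (p.1 == (cs.length : Int) - 1 || !(PySem.List.pyGet? cs (p.1 + 1) == some '\n'))))
    = scanCR false cs := by
  rw [Bool.eq_iff_iff, List.any_eq_true, scanCR_iff]
  constructor
  · rintro ⟨p, hp, hf⟩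
    rw [PySem.List.mem_enumerate_iff] at hp
    obtain ⟨k, hk, rfl⟩ := hp
    simp only [zero_add, Bool.and_eq_true, beq_iff_eq, Bool.or_eq_true] at hf
    right
    refine ⟨k, hk, hf.1, ?_⟩
    rcases hf.2 with hlast | hget
    · have : k = cs.length - 1 := by
        have : (k : Int) = (cs.length : Int) - 1 := by simpa using hlast
        omega
      subst this
      have : cs.length - 1 + 1 = cs.length := by omega
      rw [this]
      simp
    · have hcast : (k : Int) + 1 = ((k + 1 : Nat) : Int) := by omega
      rw [hcast, PySem.List.pyGet?_natCast] at hget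
      simpa using hget
  · rintro (⟨hb, _⟩ | ⟨k, hk, hr, hn⟩)
    · exact absurd hb (by simp)
    · refine ⟨((k : Int), cs[k]), ?_, ?_⟩
      · rw [PySem.List.mem_enumerate_iff]
        exact ⟨k, hk, by simp⟩
      · simp only [Bool.and_eq_true, beq_iff_eq, Bool.or_eq_true]
        refine ⟨hr, Or.inr ?_⟩
        have hcast : (k : Int) + 1 = ((k + 1 : Nat) : Int) := by omega
        rw [hcast, PySem.List.pyGet?_natCast]
        simpa using hn

-- ===== VERDICT (by name: the statement is the Claim_ definition above) =====
theorem detect_newline_style_spec : Claim_equal_detect_newline_style := by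
  intro content _
  unfold Spec_detect_newline_style
  have h := bLoop_spec false false false none content.toList
  rw [show ((none : Option Char) == some '\r') = false from rfl] at h
  simp only [detect_newline_style, detect_newline_style_alt]
  rw [a_crlf_eq, a_lf_eq, a_cr_eq, h.1, h.2.1, h.2.2]
  simp
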